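-- pv_equiv track=rewrite | github.com/kaemori/paramath3 | paramath.py | code_to_lines
-- ===== SOURCE A (Python) =====
-- def code_to_lines(source):
--     if isinstance(source, str):
--         lines = source.splitlines(keepends=True)
--     else:
--         lines = list(source)
--
--     expanded_lines = [
--         part if i == 0 else " " * (len(line) - len(line.lstrip())) + part.lstrip()
--         for line in lines
--         for i, part in enumerate(line.split(";"))
--     ]
--
--     code = []
--     curr_line = ""
--     bracket_level = 0
--     last_level_zero_line = 0
--     for i, line in enumerate(expanded_lines):
--         if bracket_level == 0:
--             bracket_level += line.count("(") - line.count(")")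
--             if bracket_level < 0:
--                 raise SyntaxError(f"Line {i+1}: Unmatched closing parenthesis")
--             if bracket_level > 0:
--                 curr_line += line.rstrip()
--                 last_level_zero_line = i + 1
--             else:
--                 code.append(line.rstrip())
--         else:
--             curr_line += line.strip()
--             bracket_level += line.count("(") - line.count(")")
--             if bracket_level < 0:
--                 raise SyntaxError(f"Line {i+1}: Unmatched closing parenthesis")
--             if bracket_level == 0:
--                 code.append(curr_line)
--                 curr_line = ""
--
--     if bracket_level > 0:
--         raise SyntaxError(
--             f"EOF: Unmatched opening parenthesis starting at line {last_level_zero_line}"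
--         )
--
--     return code
-- ===== SOURCE B (Python) =====
-- def code_to_lines(source):
--     # Staged-passes reimplementation: instead of running a bracket-level state
--     # machine part by part, compute the running paren balance after every part,
--     # then cut the part list at the positions where the balance is zero and
--     # render each chunk by joining it (first part rstripped, the rest stripped).
--     if isinstance(source, str):
--         lines = source.splitlines(keepends=True)
--     else:
--         lines = list(source)
--
--     parts = [
--         part if i == 0 else " " * (len(line) - len(line.lstrip())) + part.lstrip()
--         for line in lines
--         for i, part in enumerate(line.split(";"))
--     ]
--
--     # pass 1: running balance after each part
--     bal = []
--     b = 0
--     for p in parts: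
--         b += p.count("(") - p.count(")")
--         bal.append(b)
--
--     # error checks, up front
--     for i, v in enumerate(bal):
--         if v < 0:
--             raise SyntaxError(f"Line {i+1}: Unmatched closing parenthesis")
--     if b > 0:
--         start = max(i + 1 for i, v in enumerate(bal)
--                     if v > 0 and (bal[i - 1] == 0 if i > 0 else True))
--         raise SyntaxError(
--             f"EOF: Unmatched opening parenthesis starting at line {start}"
--         )
--
--     # pass 2: cut at the zero-balance positions and render each chunk
--     code = []
--     start = 0
--     for i, v in enumerate(bal):
--         if v == 0:
--             chunk = parts[start:i + 1]
--             code.append(chunk[0].rstrip() + "".join(p.strip() for p in chunk[1:]))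
--             start = i + 1
--     return code
-- ===== Notes on version B (the rewrite author's own statement) =====
-- stated objective: alternative
-- what changed: A runs an online bracket-level state machine (code, curr_line, bracket_level) over the expanded parts; B instead computes the running parenthesis balance after every part in one pass, then cuts the part list at the zero-balance positions and renders each chunk by slicing and joining it (first part rstripped, the rest stripped).
import Mathlib
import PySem

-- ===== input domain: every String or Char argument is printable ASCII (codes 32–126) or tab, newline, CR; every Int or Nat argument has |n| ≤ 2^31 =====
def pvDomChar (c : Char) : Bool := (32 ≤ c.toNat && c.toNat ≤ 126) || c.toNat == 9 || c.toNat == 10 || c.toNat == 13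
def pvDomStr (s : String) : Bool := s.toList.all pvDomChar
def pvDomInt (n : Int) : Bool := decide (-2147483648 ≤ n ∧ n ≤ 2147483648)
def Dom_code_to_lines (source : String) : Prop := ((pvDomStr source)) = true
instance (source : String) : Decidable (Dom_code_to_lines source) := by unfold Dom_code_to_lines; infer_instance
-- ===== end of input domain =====

-- B replaces A's online bracket-level state machine by staged passes: it computes the
-- running parenthesis balance after every ';'-split part, then cuts the part list at the
-- zero-balance positions and renders each chunk by joining its slice (objective: alternative).

-- shared helper: source.splitlines(keepends=True) — hand-ported (not in PySem); exact on the
-- ASCII+tab/newline/CR domain, where the line breaks are '\n', '\r' and '\r\n'.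
def pvSLKAux : List Char → List Char → List (List Char)
  | acc, [] => if acc.isEmpty then [] else [acc.reverse]
  | acc, '\r' :: '\n' :: t => (acc.reverse ++ ['\r', '\n']) :: pvSLKAux [] t
  | acc, '\n' :: t => (acc.reverse ++ ['\n']) :: pvSLKAux [] t
  | acc, '\r' :: t => (acc.reverse ++ ['\r']) :: pvSLKAux [] t
  | acc, c :: t => pvSLKAux (c :: acc) t

def pvSplitlinesKeep (cs : List Char) : List (List Char) := pvSLKAux [] cs

-- shared helper: p.count("(") - p.count(")")
def pvDelta (p : List Char) : Int :=
  (PySem.Chars.count p ['('] : Int) - (PySem.Chars.count p [')'] : Int)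

-- shared helper: " " * (len(line) - len(line.lstrip()))
def pvIndent (line : List Char) : List Char :=
  List.replicate (line.length - (PySem.Chars.lstrip line).length) ' '

-- shared helper: the reflow comprehension both Pythons use to build the expanded parts:
-- [part if i == 0 else indent + part.lstrip() for i, part in enumerate(line.split(";"))]
def pvExpand (line : List Char) : List (List Char) :=
  (PySem.List.enumerate (PySem.Chars.splitOn line [';'])).map
    (fun ip => if ip.1 = 0 then ip.2 else pvIndent line ++ PySem.Chars.lstrip ip.2)

-- ===== PORT A =====
-- A's loop body on state (code, curr_line, bracket_level); the two `raise` branches are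
-- unreachable on Pre_ (they are exactly what Pre_code_to_lines excludes), so the port drops them.
def pvStepA (st : List (List Char) × List Char × Int) (line : List Char) :
    List (List Char) × List Char × Int :=
  if st.2.2 = 0 then
    let lvl1 := st.2.2 + pvDelta line
    if lvl1 > 0 then (st.1, st.2.1 ++ PySem.Chars.rstrip line, lvl1)
    else (st.1 ++ [PySem.Chars.rstrip line], st.2.1, lvl1)
  else
    let curr1 := st.2.1 ++ PySem.Chars.strip line
    let lvl1 := st.2.2 + pvDelta line
    if lvl1 = 0 then (st.1 ++ [curr1], [], lvl1)
    else (st.1, curr1, lvl1)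

def code_to_lines (source : String) : List String :=
  let lines := pvSplitlinesKeep source.toList
  let expanded := lines.flatMap pvExpand
  ((expanded.foldl pvStepA ([], [], 0)).1).map String.ofList

-- ===== PORT B =====
-- pass 1: the running balance after each part (Python builds it with a loop and append)
def pvBalList : List (List Char) → Int → List Int
  | [], _ => []
  | p :: t, b => (b + pvDelta p) :: pvBalList t (b + pvDelta p)

-- chunk[0].rstrip() + "".join(p.strip() for p in chunk[1:]); in B the chunk is never
-- empty (start ≤ i always), so Python's chunk[0] never raises; [] maps to [].
def pvRenderChunk (chunk : List (List Char)) : List Char :=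
  match chunk with
  | [] => []
  | h :: t => PySem.Chars.rstrip h ++ PySem.Chars.join [] (t.map PySem.Chars.strip)

-- pass 2: `for i, v in enumerate(bal): if v == 0: append rendered parts[start:i+1]`
def pvCutLoop (parts : List (List Char)) :
    List Int → Nat → List (List Char) → Nat → List (List Char)
  | [], _, code, _ => code
  | v :: t, i, code, start =>
    if v = 0 then
      pvCutLoop parts t (i + 1)
        (code ++ [pvRenderChunk (PySem.List.slice parts (some (start : Int)) (some ((i + 1 : Nat) : Int)))])
        (i + 1)
    else pvCutLoop parts t (i + 1) code start

def code_to_lines_alt (source : String) : List String :=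
  let lines := pvSplitlinesKeep source.toList
  let parts := lines.flatMap pvExpand
  let bal := pvBalList parts 0
  -- B's two raise paths (a negative balance, a positive final balance) are exactly
  -- what Pre_code_to_lines excludes, so the port drops them.
  (pvCutLoop parts bal 0 [] 0).map String.ofList

-- ===== PRECONDITION & SPEC =====
-- the ';'/line-boundary pieces of the source (before the indentation reflow, which
-- cannot change a parenthesis count)
def pvRawParts (source : String) : List (List Char) :=
  (pvSplitlinesKeep source.toList).flatMap (fun l => PySem.Chars.splitOn l [';'])

-- Pre_ excludes exactly the inputs on which A raises SyntaxError: a piece after which the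
-- running parenthesis balance is negative, or a nonzero balance at end of input.
def Pre_code_to_lines (source : String) : Prop :=
  (∀ k ∈ List.range (pvRawParts source).length,
      0 ≤ (((pvRawParts source).take (k + 1)).map pvDelta).sum) ∧
  ((pvRawParts source).map pvDelta).sum = 0
instance (source : String) : Decidable (Pre_code_to_lines source) := by
  unfold Pre_code_to_lines; infer_instance

def pvWitness_code_to_lines : String := "x = (1,\n  2); y\n"

def Spec_code_to_lines (source : String) (out : List String) : Prop := out = code_to_lines_alt source
instance (source : String) (out : List String) : Decidable (Spec_code_to_lines source out) := by
  unfold Spec_code_to_lines; infer_instance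

-- ===== CLAIM (what is proved, stated in full; the proofs are below) =====
def Claim_equal_code_to_lines : Prop := ∀ (source : String), Dom_code_to_lines source → Pre_code_to_lines source → Spec_code_to_lines source (code_to_lines source)

-- ===== LEMMAS AND PROOFS =====

-- Chars.count with a single-character needle is List.count.
theorem pvCount_go_singleton (c : Char) :
    ∀ (fuel : Nat) (s : List Char) (acc : Nat), s.length ≤ fuel →
      PySem.Chars.count.go [c] fuel s acc = acc + s.count c := by
  intro fuel
  induction fuel with
  | zero =>
    intro s acc h
    cases s with
    | nil => simp [PySem.Chars.count.go]
    | cons a t => simp at h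
  | succ n ih =>
    intro s acc h
    cases s with
    | nil => simp [PySem.Chars.count.go]
    | cons a t =>
      by_cases hac : c = a
      · subst hac
        simp [PySem.Chars.count.go, List.isPrefixOf, ih t (acc + 1) (by simpa using h)]
        omega
      · have : [c].isPrefixOf (a :: t) = false := by
          simp [List.isPrefixOf]
          exact fun hb => absurd (by simpa using hb) hac
        simp [PySem.Chars.count.go, this, ih t acc (by simpa using h), List.count_cons,
          (by simpa using Ne.symm hac : (a == c) = false)]

theorem pvCount_singleton (s : List Char) (c : Char) :
    PySem.Chars.count s [c] = s.count c := by
  simpa using pvCount_go_singleton c s.length s 0 le_rfl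

-- dropping whitespace never drops a parenthesis
theorem pvCount_dropWhile (f : Char → Bool) (c : Char) (hc : f c = false) :
    ∀ s : List Char, (s.dropWhile f).count c = s.count c := by
  intro s
  induction s with
  | nil => rfl
  | cons a t ih =>
    by_cases hf : f a
    · have hac : a ≠ c := by rintro rfl; simp [hf] at hc
      simp [hf, ih, hac]
    · simp [hf]

-- the indentation reflow preserves the parenthesis delta of a part
theorem pvDelta_reflow (line p : List Char) :
    pvDelta (pvIndent line ++ PySem.Chars.lstrip p) = pvDelta p := by
  unfold pvDelta pvIndent
  simp only [pvCount_singleton, List.count_append, List.count_replicate,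
    PySem.Chars.lstrip, pvCount_dropWhile _ _ (by decide : PySem.Chars.isspace '(' = false),
    pvCount_dropWhile _ _ (by decide : PySem.Chars.isspace ')' = false)]
  push_cast
  ring

-- hence the expanded parts have the same deltas as the raw parts
theorem pvDelta_expand (line : List Char) :
    (pvExpand line).map pvDelta = (PySem.Chars.splitOn line [';']).map pvDelta := by
  unfold pvExpand
  rw [List.map_map]
  have : (pvDelta ∘ fun ip : Int × List Char =>
      if ip.1 = 0 then ip.2 else pvIndent line ++ PySem.Chars.lstrip ip.2)
      = (fun ip : Int × List Char => pvDelta ip.2) := by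
    funext ip
    by_cases h : ip.1 = 0 <;> simp [h, pvDelta_reflow]
  rw [this]
  have h2 : (fun ip : Int × List Char => pvDelta ip.2)
      = pvDelta ∘ (fun ip : Int × List Char => ip.2) := rfl
  rw [h2, ← List.map_map, PySem.List.map_snd_enumerate]

theorem pvDelta_flatMap (lines : List (List Char)) :
    (lines.flatMap pvExpand).map pvDelta
      = (lines.flatMap (fun l => PySem.Chars.splitOn l [';'])).map pvDelta := by
  induction lines with
  | nil => rfl
  | cons l t ih => simp [List.flatMap_cons, List.map_append, ih, pvDelta_expand]

-- "".join over a list extended by one piece appends that piece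
theorem pvJoin_nil_append (xs : List (List Char)) (p : List Char) :
    PySem.Chars.join [] (xs ++ [p]) = PySem.Chars.join [] xs ++ p := by
  induction xs with
  | nil => simp [PySem.Chars.join_singleton, PySem.Chars.join_nil]
  | cons h t ih =>
    cases t with
    | nil => simp [PySem.Chars.join_singleton, PySem.Chars.join_cons_cons]
    | cons a b =>
      have e1 : (h :: a :: b) ++ [p] = h :: a :: (b ++ [p]) := by simp
      have e2 : (a :: b) ++ [p] = a :: (b ++ [p]) := by simp
      rw [e1, PySem.Chars.join_cons_cons, PySem.Chars.join_cons_cons, ← e2, ih]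
      simp

-- rendering a chunk extended by one part appends that part stripped
theorem pvRenderChunk_append (c : List (List Char)) (hc : c ≠ []) (p : List Char) :
    pvRenderChunk (c ++ [p]) = pvRenderChunk c ++ PySem.Chars.strip p := by
  cases c with
  | nil => exact absurd rfl hc
  | cons h t =>
    simp only [pvRenderChunk, List.cons_append, List.map_append, List.map_cons, List.map_nil]
    rw [pvJoin_nil_append]
    simp

-- the main invariant: A's fold over the remaining parts computes the same code list as
-- B's cut loop over the remaining balances, provided every running balance stays ≥ 0
theorem pvMain (allParts : List (List Char)) :
    ∀ (ps : List (List Char)) (i0 start : Nat) (code : List (List Char)) (curr : List Char) (b : Int),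
      allParts.drop i0 = ps →
      (∀ k ∈ List.range ps.length, 0 ≤ b + ((ps.take (k + 1)).map pvDelta).sum) →
      ((b = 0 ∧ curr = [] ∧ start = i0) ∨
        (0 < b ∧ start < i0 ∧
          curr = pvRenderChunk ((allParts.drop start).take (i0 - start)))) →
      (ps.foldl pvStepA (code, curr, b)).1 = pvCutLoop allParts (pvBalList ps b) i0 code start := by
  intro ps
  induction ps with
  | nil =>
    intro i0 start code curr b _ _ _
    simp [pvBalList, pvCutLoop]
  | cons p t ih =>
    intro i0 start code curr b hdrop hnn hst
    have hb' : 0 ≤ b + pvDelta p := by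
      have := hnn 0 (by simp)
      simpa using this
    have hnn' : ∀ k ∈ List.range t.length,
        0 ≤ (b + pvDelta p) + ((t.take (k + 1)).map pvDelta).sum := by
      intro k hk
      have := hnn (k + 1) (by simp at hk ⊢; omega)
      simpa [List.take_cons, add_assoc] using this
    have hdrop' : allParts.drop (i0 + 1) = t := by
      have : (allParts.drop i0).tail = t := by rw [hdrop]; rfl
      simpa [List.tail_drop] using this
    have hget : allParts[i0]? = some p := by
      rw [← List.head?_drop, hdrop]; rfl
    -- the slice parts[start:i+1] as a take of a drop
    have hslice : ∀ s : Nat, PySem.List.slice allParts (some (s : Int)) (some ((i0 + 1 : Nat) : Int))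
        = (allParts.drop s).take (i0 + 1 - s) := by
      intro s; exact PySem.List.slice_natCast allParts s (i0 + 1)
    rcases hst with ⟨hb0, hcurr, hstart⟩ | ⟨hbpos, hlt, hcurr⟩
    · -- bracket_level = 0
      subst hb0; subst hcurr; subst hstart
      rcases lt_or_eq_of_le hb' with hpos | hzero
      · -- opens a bracket: A starts curr, B skips
        have hA : pvStepA (code, ([] : List Char), (0 : Int)) p
            = (code, PySem.Chars.rstrip p, 0 + pvDelta p) := by
          simp only [pvStepA]
          rw [if_pos trivial, if_pos (by omega : (0 : Int) + pvDelta p > 0)]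
          simp
        have hne : ¬ (0 + pvDelta p = 0) := by omega
        rw [List.foldl_cons, hA, pvBalList, pvCutLoop, if_neg hne]
        apply ih (start + 1) start code _ _ hdrop' hnn'
        right
        refine ⟨by omega, by omega, ?_⟩
        have : (allParts.drop start).take (start + 1 - start) = [p] := by
          rw [hdrop]; simp
        rw [this]
        simp [pvRenderChunk, PySem.Chars.join_nil]
      · -- stays at level 0: both append the rstripped part
        have hA : pvStepA (code, ([] : List Char), (0 : Int)) p
            = (code ++ [PySem.Chars.rstrip p], [], 0 + pvDelta p) := by
          simp only [pvStepA]
          rw [if_pos trivial, if_neg (by omega : ¬ (0 : Int) + pvDelta p > 0)]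
        rw [List.foldl_cons, hA, pvBalList, pvCutLoop, if_pos (by omega)]
        have hchunk : PySem.List.slice allParts (some (start : Int)) (some ((start + 1 : Nat) : Int))
            = [p] := by
          rw [hslice start, hdrop]; simp
        rw [hchunk]
        have hrc : pvRenderChunk [p] = PySem.Chars.rstrip p := by
          simp [pvRenderChunk, PySem.Chars.join_nil]
        rw [hrc]
        have hb0' : 0 + pvDelta p = 0 := hzero.symm
        rw [hb0']
        exact ih (start + 1) (start + 1) _ _ 0
          hdrop' (by simpa [hb0'] using hnn') (Or.inl ⟨rfl, rfl, rfl⟩)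
    · -- bracket_level > 0
      have hbne : ¬ (b = 0) := by omega
      have hlenA : i0 < allParts.length := by
        rcases Nat.lt_or_ge i0 allParts.length with h | h
        · exact h
        · rw [List.drop_eq_nil_of_le h] at hdrop
          exact absurd hdrop (by simp)
      have hchunk0 : (allParts.drop start).take (i0 - start) ≠ [] := by
        intro hnil
        have := congrArg List.length hnil
        simp [List.length_take, List.length_drop] at this
        omega
      have hext : (allParts.drop start).take (i0 + 1 - start)
          = (allParts.drop start).take (i0 - start) ++ [p] := by
        have h1 : i0 + 1 - start = (i0 - start) + 1 := by omega
        rw [h1, List.take_add_one]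
        congr 1
        have : (allParts.drop start)[i0 - start]? = some p := by
          rw [List.getElem?_drop]
          have h2 : start + (i0 - start) = i0 := by omega
          rw [h2, hget]
        simp [this]
      rcases lt_or_eq_of_le hb' with hpos | hzero
      · -- still open: A extends curr, B skips
        have hA : pvStepA (code, curr, b) p
            = (code, curr ++ PySem.Chars.strip p, b + pvDelta p) := by
          simp only [pvStepA]
          rw [if_neg hbne, if_neg (by omega : ¬ b + pvDelta p = 0)]
        rw [List.foldl_cons, hA, pvBalList, pvCutLoop, if_neg (by omega)]
        apply ih (i0 + 1) start code _ _ hdrop' hnn'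
        right
        refine ⟨by omega, by omega, ?_⟩
        rw [hext, pvRenderChunk_append _ hchunk0, hcurr]
      · -- closes: A appends curr ++ strip p, B cuts the chunk
        have hA : pvStepA (code, curr, b) p
            = (code ++ [curr ++ PySem.Chars.strip p], [], b + pvDelta p) := by
          simp only [pvStepA]
          rw [if_neg hbne, if_pos (by omega : b + pvDelta p = 0)]
        rw [List.foldl_cons, hA, pvBalList, pvCutLoop, if_pos (by omega)]
        rw [hslice start, hext, pvRenderChunk_append _ hchunk0, ← hcurr]
        have hb0' : b + pvDelta p = 0 := hzero.symm
        rw [hb0']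
        exact ih (i0 + 1) (i0 + 1) _ _ 0
          hdrop' (by simpa [hb0'] using hnn') (Or.inl ⟨rfl, rfl, rfl⟩)

theorem code_to_lines_eq_alt (source : String) (hpre : Pre_code_to_lines source) :
    code_to_lines source = code_to_lines_alt source := by
  unfold code_to_lines code_to_lines_alt
  dsimp only
  congr 1
  set parts := (pvSplitlinesKeep source.toList).flatMap pvExpand with hparts
  have hmaps : parts.map pvDelta = (pvRawParts source).map pvDelta := by
    rw [hparts, pvDelta_flatMap]; rfl
  have hlen : parts.length = (pvRawParts source).length := by
    have := congrArg List.length hmaps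
    simpa using this
  apply pvMain parts parts 0 0 [] [] 0 (by simp)
  · intro k hk
    have hk' : k ∈ List.range (pvRawParts source).length := by
      simp at hk ⊢; omega
    have := hpre.1 k hk'
    have hsum : ((parts.take (k + 1)).map pvDelta).sum
        = (((pvRawParts source).take (k + 1)).map pvDelta).sum := by
      rw [List.map_take, List.map_take, hmaps]
    omega
  · exact Or.inl ⟨rfl, rfl, rfl⟩

-- ===== VERDICT (by name: the statement is the Claim_ definition above) =====
theorem code_to_lines_spec : Claim_equal_code_to_lines := by
  intro source _ hpre
  exact code_to_lines_eq_alt source hpre
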